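-- pv_equiv track=rewrite | github.com/RavenInDisguise/Python-Programs | Prácticas recursividad/Práctica #1 Oficial/funcionesRecPila.py | sumarMultiplosRec
-- ===== SOURCE A (Python) =====
-- def sumarMultiplosRec(num,dig):
--     """
--     Funcionalidad: Sumar los dígitos del primer números que sean múltiplos del segundo.
--     Entradas: Ambos números.
--     Salidas: El resultado de las operaciones.
--     """
--     if num==0:
--         return 0
--     else:
--         resultado=(num%10)%dig
--         if resultado==0:
--             return num%10 + sumarMultiplosRec(num//10,dig)
--         else:
--             return sumarMultiplosRec(num//10,dig)
-- ===== SOURCE B (Python) =====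
-- def sumarMultiplosRec(num, dig):
--     total = 0
--     while num != 0:
--         d = num % 10
--         if d % dig == 0:
--             total += d
--         num //= 10
--     return total
-- ===== Notes on version B (the rewrite author's own statement) =====
-- stated objective: simpler
-- what changed: Replaces the per-digit recursion with a flat iterative while-loop keeping a running total accumulator.
import Mathlib
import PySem

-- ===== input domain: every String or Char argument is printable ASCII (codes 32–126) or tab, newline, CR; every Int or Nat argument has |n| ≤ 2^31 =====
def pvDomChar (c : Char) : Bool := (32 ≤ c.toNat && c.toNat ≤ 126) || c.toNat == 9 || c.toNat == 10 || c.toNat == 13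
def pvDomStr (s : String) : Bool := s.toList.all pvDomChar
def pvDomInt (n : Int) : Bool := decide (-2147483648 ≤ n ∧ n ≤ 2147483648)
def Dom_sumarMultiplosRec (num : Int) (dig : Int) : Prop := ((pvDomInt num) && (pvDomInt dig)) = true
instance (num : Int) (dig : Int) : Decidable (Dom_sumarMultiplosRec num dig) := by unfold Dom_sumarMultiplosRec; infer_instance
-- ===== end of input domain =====

-- B replaces A's per-digit recursion by a flat accumulator loop (simpler decomposition; same cost).
-- Return-value equivalence only; neither program mutates its arguments.

-- ===== PORT A =====
-- Literal port of A's recursion; the 'num < 0' branch is a totality guard only: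
-- Python A does not terminate for negative num, and Pre_ excludes those inputs.
def sumarMultiplosRec (num : Int) (dig : Int) : Int :=
  if num = 0 then 0
  else if num < 0 then 0  -- totality guard, outside Pre_
  else
    let resultado := PySem.Int.mod (PySem.Int.mod num 10) dig
    if resultado = 0 then
      PySem.Int.mod num 10 + sumarMultiplosRec (PySem.Int.floordiv num 10) dig
    else
      sumarMultiplosRec (PySem.Int.floordiv num 10) dig
termination_by num.toNat
decreasing_by
  all_goals
    rename_i h0 hn
    rw [PySem.Int.floordiv_eq_ediv_of_pos (by omega)]
    omega

-- ===== PORT B =====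
-- The while-loop of Source B as a tail recursion carrying the accumulator 'total'.
-- The 'num < 0' branch is a totality guard only (the Python loop does not terminate there, outside Pre_).
def sumarMultiplosAltLoop (num : Int) (dig : Int) (total : Int) : Int :=
  if num = 0 then total
  else if num < 0 then total  -- totality guard, outside Pre_
  else
    let d := PySem.Int.mod num 10
    sumarMultiplosAltLoop (PySem.Int.floordiv num 10) dig
      (if PySem.Int.mod d dig = 0 then total + d else total)
termination_by num.toNat
decreasing_by
  rename_i h0 hn
  rw [PySem.Int.floordiv_eq_ediv_of_pos (by omega)]
  omega

def sumarMultiplosRec_alt (num : Int) (dig : Int) : Int :=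
  sumarMultiplosAltLoop num dig 0

-- ===== PRECONDITION & SPEC =====
-- Pre_ excludes dig = 0 (Python A raises ZeroDivisionError) and num < 0
-- (Python A recurses forever: num//10 never reaches 0 for negative num).
def Pre_sumarMultiplosRec (num : Int) (dig : Int) : Prop := 0 ≤ num ∧ dig ≠ 0
instance (num : Int) (dig : Int) : Decidable (Pre_sumarMultiplosRec num dig) := by unfold Pre_sumarMultiplosRec; infer_instance
def pvWitness_sumarMultiplosRec : Int × Int := (123456, 3)

def Spec_sumarMultiplosRec (num : Int) (dig : Int) (out : Int) : Prop := out = sumarMultiplosRec_alt num dig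
instance (num : Int) (dig : Int) (out : Int) : Decidable (Spec_sumarMultiplosRec num dig out) := by unfold Spec_sumarMultiplosRec; infer_instance

-- ===== CLAIM (what is proved, stated in full; the proofs are below) =====
def Claim_equal_sumarMultiplosRec : Prop := ∀ (num : Int) (dig : Int), Dom_sumarMultiplosRec num dig → Pre_sumarMultiplosRec num dig → Spec_sumarMultiplosRec num dig (sumarMultiplosRec num dig)

-- ===== LEMMAS AND PROOFS =====

-- Loop invariant: the accumulator adds up with A's recursive result.
theorem altLoop_eq (dig : Int) : ∀ (num total : Int),
    sumarMultiplosAltLoop num dig total = total + sumarMultiplosRec num dig := by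
  intro num
  induction num using sumarMultiplosRec.induct dig with
  | case1 =>
    intro total
    rw [sumarMultiplosAltLoop, sumarMultiplosRec]
    simp
  | case2 num h0 hn =>
    intro total
    rw [sumarMultiplosAltLoop, sumarMultiplosRec]
    simp [h0, hn]
  | case3 num h0 hn hres heq ih =>
    intro total
    rw [sumarMultiplosAltLoop, sumarMultiplosRec]
    simp only [h0, hn, if_false, hres, heq, if_pos]
    rw [ih]
    ring
  | case4 num h0 hn hres heq ih =>
    intro total
    rw [sumarMultiplosAltLoop, sumarMultiplosRec]
    simp only [h0, hn, if_false, hres, heq]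
    rw [ih]

-- ===== VERDICT (by name: the statement is the Claim_ definition above) =====
theorem sumarMultiplosRec_spec : Claim_equal_sumarMultiplosRec := by
  intro num dig _ _
  unfold Spec_sumarMultiplosRec sumarMultiplosRec_alt
  rw [altLoop_eq]
  ring
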